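-- pv_equiv track=rewrite | github.com/Hebelub/programmeringskonsepter | DataAssignment/PythonDecoder.py | get_symbol_from_cell
-- ===== SOURCE A (Python) =====
-- def get_cell(grid, row, col):
--     if 0 <= row < len(grid) and 0 <= col < len(grid[0]):
--         cell_type = grid[row][col]
--     elif row % 2 != 0 and col % 2 != 0:
--         cell_type = 'v'
--     else:
--         cell_type = 'x'
--     return (row, col, cell_type)
--
-- def get_relative_cell(grid, cell, delta_row, delta_col):
--     row, col, _ = cell
--     return get_cell(grid, row + delta_row, col + delta_col)
--
-- def get_symbol_from_cell(grid, cell):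
--     row_index, col_index, cell_type = cell
--
--     # Get the adjacent cells
--     adjacent_cells = [
--         get_relative_cell(grid, cell, 0, 1)[2],
--         get_relative_cell(grid, cell, 1, 0)[2],
--         get_relative_cell(grid, cell, 0, -1)[2],
--         get_relative_cell(grid, cell, -1, 0)[2]
--     ]
--
--     a, b, c, d = adjacent_cells
--
--     # Pattern match to find the correct symbol
--     if adjacent_cells.count('l') == 2 and cell_type == '*':
--         return '┼'
--     elif a == b == 'l' and cell_type == 'o':
--         return '╡'
--     elif a == c == 'l' and cell_type == 'o':
--         return '╨'
--     elif a == b == 'l':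
--         return '┌'
--     elif b == c == 'l':
--         return '┐'
--     elif c == d == 'l':
--         return '┘'
--     elif d == a == 'l':
--         return '└'
--     elif a == b == c == 'l':
--         return '├'
--     elif b == c == d == 'l':
--         return '┤'
--     elif c == d == a == 'l':
--         return '┴'
--     elif d == a == b == 'l':
--         return '┬'
--     elif all(x == 'l' for x in [a, b, c, d]):
--         return '┼'
--     elif a == c == 'l':
--         return '─'
--     elif b == d == 'l':
--         return '│'
--     elif cell_type == '*':
--         return '*'
--     elif cell_type == 'o':
--         return 'o'
--     else:
--         return ' '
-- ===== SOURCE B (Python) =====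
-- # Table-driven: neighbour pattern -> 4-bit mask, one dict lookup instead of the if-elif chain.
-- _SYMBOL = {
--     ('*', 15): '┌',
--     ('*', 14): '┌',
--     ('*', 13): '┌',
--     ('*', 12): '┼',
--     ('*', 11): '┘',
--     ('*', 10): '┼',
--     ('*', 9): '┼',
--     ('*', 8): '*',
--     ('*', 7): '┐',
--     ('*', 6): '┼',
--     ('*', 5): '┼',
--     ('*', 4): '*',
--     ('*', 3): '┼',
--     ('*', 2): '*',
--     ('*', 1): '*',
--     ('*', 0): '*',
--     ('o', 15): '╡',
--     ('o', 14): '╡',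
--     ('o', 13): '╡',
--     ('o', 12): '╡',
--     ('o', 11): '╨',
--     ('o', 10): '╨',
--     ('o', 9): '└',
--     ('o', 8): 'o',
--     ('o', 7): '┐',
--     ('o', 6): '┐',
--     ('o', 5): '│',
--     ('o', 4): 'o',
--     ('o', 3): '┘',
--     ('o', 2): 'o',
--     ('o', 1): 'o',
--     ('o', 0): 'o',
--     (' ', 15): '┌',
--     (' ', 14): '┌',
--     (' ', 13): '┌',
--     (' ', 12): '┌',
--     (' ', 11): '┘',
--     (' ', 10): '─',
--     (' ', 9): '└',
--     (' ', 8): ' ',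
--     (' ', 7): '┐',
--     (' ', 6): '┐',
--     (' ', 5): '│',
--     (' ', 4): ' ',
--     (' ', 3): '┘',
--     (' ', 2): ' ',
--     (' ', 1): ' ',
--     (' ', 0): ' ',
-- }
--
--
-- def get_symbol_from_cell(grid, cell):
--     row, col, cell_type = cell
--
--     def neighbor_is_line(dr, dc):
--         r, c = row + dr, col + dc
--         return 0 <= r < len(grid) and 0 <= c < len(grid[0]) and grid[r][c] == 'l'
--
--     mask = (8 * neighbor_is_line(0, 1)
--             + 4 * neighbor_is_line(1, 0)
--             + 2 * neighbor_is_line(0, -1)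
--             + 1 * neighbor_is_line(-1, 0))
--     category = cell_type if cell_type in ('*', 'o') else ' '
--     return _SYMBOL[(category, mask)]
-- ===== Notes on version B (the rewrite author's own statement) =====
-- stated objective: idiomatic
-- what changed: Replaces the 17-branch sequential if-elif chain by reducing the four neighbours to a 4-bit 'is line' mask and resolving the symbol with a single lookup in a precomputed (category, mask) -> symbol table that encodes the chain's priorities (including the '*'/'o' overrides and its dead branches).
import Mathlib
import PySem

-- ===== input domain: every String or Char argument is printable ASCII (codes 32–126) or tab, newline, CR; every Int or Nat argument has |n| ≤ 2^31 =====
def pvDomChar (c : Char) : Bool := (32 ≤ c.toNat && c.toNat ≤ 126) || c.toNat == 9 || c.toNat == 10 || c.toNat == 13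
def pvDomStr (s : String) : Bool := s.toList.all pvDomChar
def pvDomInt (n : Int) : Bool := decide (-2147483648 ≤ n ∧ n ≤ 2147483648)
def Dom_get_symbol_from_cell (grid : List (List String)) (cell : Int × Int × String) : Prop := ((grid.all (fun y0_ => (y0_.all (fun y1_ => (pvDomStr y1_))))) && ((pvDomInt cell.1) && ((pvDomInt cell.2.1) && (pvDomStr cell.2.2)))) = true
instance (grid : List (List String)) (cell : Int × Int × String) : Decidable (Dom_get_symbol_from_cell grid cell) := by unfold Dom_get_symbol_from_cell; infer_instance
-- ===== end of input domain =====

-- ===== PORT A =====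
-- B replaces A's sequential if-elif chain by one lookup in a precomputed (category, neighbour-mask) table (objective: idiomatic).
-- helper: Python get_cell (out-of-range cells become 'v'/'x'); the in-range read grid[row][col]
--   uses getD, exact under Pre_ (Python raises IndexError on ragged rows, excluded by Pre_).
def pv_get_cell (grid : List (List String)) (row col : Int) : Int × Int × String :=
  let cell_type :=
    if 0 ≤ row ∧ row < (grid.length : Int) ∧ 0 ≤ col ∧ col < ((grid.headD []).length : Int) then
      (grid.getD row.toNat []).getD col.toNat ""
    else if PySem.Int.mod row 2 ≠ 0 ∧ PySem.Int.mod col 2 ≠ 0 then "v"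
    else "x"
  (row, col, cell_type)

def pv_get_relative_cell (grid : List (List String)) (cell : Int × Int × String) (delta_row delta_col : Int) : Int × Int × String :=
  pv_get_cell grid (cell.1 + delta_row) (cell.2.1 + delta_col)

def get_symbol_from_cell (grid : List (List String)) (cell : Int × Int × String) : String :=
  let cell_type := cell.2.2
  let adjacent_cells :=
    [ (pv_get_relative_cell grid cell 0 1).2.2,
      (pv_get_relative_cell grid cell 1 0).2.2,
      (pv_get_relative_cell grid cell 0 (-1)).2.2,
      (pv_get_relative_cell grid cell (-1) 0).2.2 ]
  let a := adjacent_cells.getD 0 ""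
  let b := adjacent_cells.getD 1 ""
  let c := adjacent_cells.getD 2 ""
  let d := adjacent_cells.getD 3 ""
  if PySem.List.count adjacent_cells "l" = 2 ∧ cell_type = "*" then "┼"
  else if a = b ∧ b = "l" ∧ cell_type = "o" then "╡"
  else if a = c ∧ c = "l" ∧ cell_type = "o" then "╨"
  else if a = b ∧ b = "l" then "┌"
  else if b = c ∧ c = "l" then "┐"
  else if c = d ∧ d = "l" then "┘"
  else if d = a ∧ a = "l" then "└"
  else if a = b ∧ b = c ∧ c = "l" then "├"
  else if b = c ∧ c = d ∧ d = "l" then "┤"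
  else if c = d ∧ d = a ∧ a = "l" then "┴"
  else if d = a ∧ a = b ∧ b = "l" then "┬"
  else if [a, b, c, d].all (fun x => x == "l") then "┼"
  else if a = c ∧ c = "l" then "─"
  else if b = d ∧ d = "l" then "│"
  else if cell_type = "*" then "*"
  else if cell_type = "o" then "o"
  else " "

-- ===== PORT B =====
-- B's precomputed table: (category, 4-bit neighbour mask) -> symbol
def pvSymbolTable : PySem.Dict (String × Int) String :=
  PySem.Dict.ofList
  [(("*", (15 : Int)), "┌"),
   (("*", (14 : Int)), "┌"),
   (("*", (13 : Int)), "┌"),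
   (("*", (12 : Int)), "┼"),
   (("*", (11 : Int)), "┘"),
   (("*", (10 : Int)), "┼"),
   (("*", (9 : Int)), "┼"),
   (("*", (8 : Int)), "*"),
   (("*", (7 : Int)), "┐"),
   (("*", (6 : Int)), "┼"),
   (("*", (5 : Int)), "┼"),
   (("*", (4 : Int)), "*"),
   (("*", (3 : Int)), "┼"),
   (("*", (2 : Int)), "*"),
   (("*", (1 : Int)), "*"),
   (("*", (0 : Int)), "*"),
   (("o", (15 : Int)), "╡"),
   (("o", (14 : Int)), "╡"),
   (("o", (13 : Int)), "╡"),
   (("o", (12 : Int)), "╡"),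
   (("o", (11 : Int)), "╨"),
   (("o", (10 : Int)), "╨"),
   (("o", (9 : Int)), "└"),
   (("o", (8 : Int)), "o"),
   (("o", (7 : Int)), "┐"),
   (("o", (6 : Int)), "┐"),
   (("o", (5 : Int)), "│"),
   (("o", (4 : Int)), "o"),
   (("o", (3 : Int)), "┘"),
   (("o", (2 : Int)), "o"),
   (("o", (1 : Int)), "o"),
   (("o", (0 : Int)), "o"),
   ((" ", (15 : Int)), "┌"),
   ((" ", (14 : Int)), "┌"),
   ((" ", (13 : Int)), "┌"),
   ((" ", (12 : Int)), "┌"),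
   ((" ", (11 : Int)), "┘"),
   ((" ", (10 : Int)), "─"),
   ((" ", (9 : Int)), "└"),
   ((" ", (8 : Int)), " "),
   ((" ", (7 : Int)), "┐"),
   ((" ", (6 : Int)), "┐"),
   ((" ", (5 : Int)), "│"),
   ((" ", (4 : Int)), " "),
   ((" ", (3 : Int)), "┘"),
   ((" ", (2 : Int)), " "),
   ((" ", (1 : Int)), " "),
   ((" ", (0 : Int)), " ")]

def pv_neighbor_is_line (grid : List (List String)) (row col dr dc : Int) : Bool :=
  let r := row + dr
  let c := col + dc
  decide (0 ≤ r) && decide (r < (grid.length : Int)) &&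
  decide (0 ≤ c) && decide (c < ((grid.headD []).length : Int)) &&
  ((grid.getD r.toNat []).getD c.toNat "" == "l")   -- grid[r][c] == 'l'; getD exact under Pre_

def get_symbol_from_cell_alt (grid : List (List String)) (cell : Int × Int × String) : String :=
  let row := cell.1
  let col := cell.2.1
  let cell_type := cell.2.2
  let mask : Int :=
    8 * (if pv_neighbor_is_line grid row col 0 1 then 1 else 0) +
    4 * (if pv_neighbor_is_line grid row col 1 0 then 1 else 0) +
    2 * (if pv_neighbor_is_line grid row col 0 (-1) then 1 else 0) +
    1 * (if pv_neighbor_is_line grid row col (-1) 0 then 1 else 0)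
  let category := if cell_type = "*" ∨ cell_type = "o" then cell_type else " "
  (pvSymbolTable.get? (category, mask)).getD " "   -- the table is total on its 48 keys, so the lookup never misses

-- ===== PRECONDITION & SPEC =====
-- Pre_ excludes exactly the inputs where Python raises IndexError: a neighbour position that passes
-- the 'len(grid[0])'-based bounds check but falls off its own (shorter, ragged) row.
def Pre_get_symbol_from_cell (grid : List (List String)) (cell : Int × Int × String) : Prop :=
  ∀ p ∈ [((0:Int),(1:Int)), (1,0), (0,-1), (-1,0)],
    (0 ≤ cell.1 + p.1 ∧ cell.1 + p.1 < (grid.length : Int) ∧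
     0 ≤ cell.2.1 + p.2 ∧ cell.2.1 + p.2 < ((grid.headD []).length : Int)) →
    cell.2.1 + p.2 < ((grid.getD (cell.1 + p.1).toNat []).length : Int)
instance (grid : List (List String)) (cell : Int × Int × String) : Decidable (Pre_get_symbol_from_cell grid cell) := by
  unfold Pre_get_symbol_from_cell; infer_instance

def pvWitness_get_symbol_from_cell : List (List String) × (Int × Int × String) :=
  ([["*", "l"], ["l", "o"]], (0, 0, "*"))

def Spec_get_symbol_from_cell (grid : List (List String)) (cell : Int × Int × String) (out : String) : Prop := out = get_symbol_from_cell_alt grid cell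
instance (grid : List (List String)) (cell : Int × Int × String) (out : String) : Decidable (Spec_get_symbol_from_cell grid cell out) := by unfold Spec_get_symbol_from_cell; infer_instance

-- ===== CLAIM (what is proved, stated in full; the proofs are below) =====
def Claim_equal_get_symbol_from_cell : Prop := ∀ (grid : List (List String)) (cell : Int × Int × String), Dom_get_symbol_from_cell grid cell → Pre_get_symbol_from_cell grid cell → Spec_get_symbol_from_cell grid cell (get_symbol_from_cell grid cell)

-- ===== LEMMAS AND PROOFS =====

-- each A-side neighbour string equals "l" exactly when B's boolean is true
lemma pv_nbr_iff (grid : List (List String)) (row col dr dc : Int) :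
    ((pv_get_cell grid (row + dr) (col + dc)).2.2 = "l") ↔ pv_neighbor_is_line grid row col dr dc = true := by
  unfold pv_get_cell pv_neighbor_is_line
  split_ifs with h1 h2 <;> simp_all

-- ===== VERDICT (by name: the statement is the Claim_ definition above) =====
set_option maxRecDepth 4096 in
theorem get_symbol_from_cell_spec : Claim_equal_get_symbol_from_cell := by
  intro grid cell _ _
  obtain ⟨row, col, ct⟩ := cell
  have ha := pv_nbr_iff grid row col 0 1
  have hb := pv_nbr_iff grid row col 1 0
  have hc := pv_nbr_iff grid row col 0 (-1)
  have hd := pv_nbr_iff grid row col (-1) 0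
  unfold Spec_get_symbol_from_cell get_symbol_from_cell get_symbol_from_cell_alt pv_get_relative_cell
  rcases hxa : pv_neighbor_is_line grid row col 0 1 with _ | _ <;>
  rcases hxb : pv_neighbor_is_line grid row col 1 0 with _ | _ <;>
  rcases hxc : pv_neighbor_is_line grid row col 0 (-1) with _ | _ <;>
  rcases hxd : pv_neighbor_is_line grid row col (-1) 0 with _ | _ <;>
  simp only [hxa, hxb, hxc, hxd] at ha hb hc hd <;>
  by_cases h1 : ct = "*" <;> by_cases h2 : ct = "o" <;>
  simp_all [PySem.List.count] <;> decide
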